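-- pv_equiv track=rewrite | github.com/j900155/spark-streaming | streamingKmean-elaticsearch.py | replaceColumn
-- ===== SOURCE A (Python) =====
-- def replaceColumn(column):
--     c = column
--     for i in range(0,len(c)):
--         text = c[i]
--         space = 0
--         while(1):
--             space = text.find(" ")
--             if(space==-1):
--                 break
--             text = text[:space]+text[space+1].upper()+text[space+2:]
--     #        text = text.replace(str(text[space]),str(text[space].upper()),1)
--             #print (text)
--         c[i] = text
--     return c
-- ===== SOURCE B (Python) =====
-- def replaceColumn(column):
--     for i in range(len(column)):
--         out = []
--         up = False
--         for ch in column[i]: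
--             if ch == ' ':
--                 up = True
--             elif up:
--                 out.append(ch.upper())
--                 up = False
--             else:
--                 out.append(ch)
--         column[i] = ''.join(out)
--     return column
-- ===== Notes on version B (the rewrite author's own statement) =====
-- stated objective: alternative
-- what changed: replaces the repeated find-and-splice while-loop (rescan and rebuild the string after every space) with a single left-to-right pass keeping an uppercase-next flag
-- crash fix: A raises IndexError whenever some element ends with a space (text[space+1] past the end); B returns the string with all spaces dropped and each character that follows a space uppercased. — e.g. on replaceColumn(["a "]): A raises IndexError, B returns ["a"]
import Mathlib
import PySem

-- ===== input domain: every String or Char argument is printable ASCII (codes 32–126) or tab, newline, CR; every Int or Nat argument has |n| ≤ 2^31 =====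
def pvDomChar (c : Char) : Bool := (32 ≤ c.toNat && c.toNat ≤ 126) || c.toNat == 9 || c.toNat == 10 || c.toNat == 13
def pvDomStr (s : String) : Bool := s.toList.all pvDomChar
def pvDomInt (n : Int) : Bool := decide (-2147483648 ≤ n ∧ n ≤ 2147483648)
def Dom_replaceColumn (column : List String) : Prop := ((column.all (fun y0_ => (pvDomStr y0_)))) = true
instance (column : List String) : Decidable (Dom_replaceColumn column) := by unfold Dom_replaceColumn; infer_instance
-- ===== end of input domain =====

-- B replaces A's repeated find-and-splice scan with one left-to-right pass keeping an
-- uppercase-next flag (objective: alternative single-pass algorithm). A mutates its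
-- argument list in place; B performs the same in-place mutation, and the theorems here
-- are about the return value.

-- ===== PORT A =====
-- A's splice text[:space] + text[space+1].upper() + text[space+2:]; none = Python IndexError
def pvSpliceA (text : List Char) (space : Nat) : Option (List Char) :=
  match PySem.List.pyGet? text ((space : Int) + 1) with
  | none => none
  | some ch =>
      some (PySem.List.slice text none (some (space : Int)) ++ [ch.toUpper] ++
            PySem.List.slice text (some ((space : Int) + 2)) none)

theorem pvSpliceA_length (text t : List Char) (j : Nat) (h : pvSpliceA text j = some t) :
    t.length < text.length := by
  unfold pvSpliceA at h
  rcases hg : PySem.List.pyGet? text ((j : Int) + 1) with _ | ch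
  · rw [hg] at h; cases h
  · rw [hg] at h
    have hcast : ((j : Int) + 1) = ((j + 1 : Nat) : Int) := by push_cast; ring
    rw [hcast, PySem.List.pyGet?_natCast] at hg
    have hj1 : j + 1 < text.length := by
      by_contra hge
      rw [List.getElem?_eq_none (by omega)] at hg
      cases hg
    have hcast2 : ((j : Int) + 2) = ((j + 2 : Nat) : Int) := by push_cast; ring
    rw [hcast2, PySem.List.slice_to_natCast, PySem.List.slice_from_natCast] at h
    cases h
    simp [List.length_take, List.length_drop]
    omega

-- the 'while(1)' loop of A: find the first space, splice, repeat
def pvLoopA (text : List Char) : List Char :=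
  let space := PySem.Chars.find text [' ']
  if space = -1 then text
  else
    match h2 : pvSpliceA text space.toNat with
    | none => text          -- Python raises IndexError here (excluded by Pre_)
    | some t => pvLoopA t
termination_by text.length
decreasing_by exact pvSpliceA_length _ _ _ h2

-- the for-loop over indices writing c[i] = text, returning c
def replaceColumn (column : List String) : List String :=
  column.map (fun s => String.ofList (pvLoopA s.toList))

-- ===== PORT B =====
-- one pass: a space sets the flag; the next non-space char is emitted uppercased
def pvStepB (st : List Char × Bool) (ch : Char) : List Char × Bool :=
  if ch = ' ' then (st.1, true)
  else if st.2 then (st.1 ++ [ch.toUpper], false)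
  else (st.1 ++ [ch], false)

def replaceColumn_alt (column : List String) : List String :=
  column.map (fun s => String.ofList (s.toList.foldl pvStepB ([], false)).1)

-- ===== PRECONDITION & SPEC =====
-- Pre_ excludes exactly the inputs on which A raises IndexError: an element ending in ' '
-- makes A read text[space+1] past the end.
def Pre_replaceColumn (column : List String) : Prop :=
  ∀ s ∈ column, s.toList.getLast? ≠ some ' '
instance (column : List String) : Decidable (Pre_replaceColumn column) := by
  unfold Pre_replaceColumn; infer_instance
def pvWitness_replaceColumn : List String := ["hello world", "a  b"]

-- A raises IndexError whenever some element ends with a space; B returns the string with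
-- all spaces dropped and each character following a space uppercased.
def Raises_replaceColumn (column : List String) : Prop :=
  ∃ s ∈ column, s.toList.getLast? = some ' '
instance (column : List String) : Decidable (Raises_replaceColumn column) := by
  unfold Raises_replaceColumn; infer_instance
def pvRaiseWitness_replaceColumn : List String := ["a "]
def pvRaiseWitnessOut_replaceColumn : List String := ["a"]

def Spec_replaceColumn (column : List String) (out : List String) : Prop := out = replaceColumn_alt column
instance (column : List String) (out : List String) : Decidable (Spec_replaceColumn column out) := by unfold Spec_replaceColumn; infer_instance

-- ===== CLAIM (what is proved, stated in full; the proofs are below) =====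
def Claim_equal_replaceColumn : Prop := ∀ (column : List String), Dom_replaceColumn column → Pre_replaceColumn column → Spec_replaceColumn column (replaceColumn column)
def Claim_raises_replaceColumn : Prop := (∀ (column : List String), Dom_replaceColumn column → Raises_replaceColumn column → ¬ Pre_replaceColumn column) ∧ (Dom_replaceColumn (pvRaiseWitness_replaceColumn) ∧ Raises_replaceColumn (pvRaiseWitness_replaceColumn) ∧ replaceColumn_alt (pvRaiseWitness_replaceColumn) = pvRaiseWitnessOut_replaceColumn)

-- ===== LEMMAS AND PROOFS =====

-- reference function: both ports' per-string transforms equal this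
def camelU : Bool → List Char → List Char
  | _, [] => []
  | up, c :: r =>
      if c = ' ' then camelU true r
      else if up then c.toUpper :: camelU false r
      else c :: camelU false r

theorem toUpper_eq_space {c : Char} (h : c.toUpper = ' ') : c = ' ' := by
  unfold Char.toUpper at h
  split at h
  · next hc =>
      exfalso
      rw [Char.ext_iff] at h
      simp only at h
      obtain ⟨h1, h2⟩ := hc
      have hn := congrArg UInt32.toNat h
      rw [UInt32.toNat_add] at hn
      rw [UInt32.le_iff_toNat_le] at h1 h2
      rw [show (('A'.val - 'a'.val)).toNat = 4294967264 from rfl,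
          show (' '.val).toNat = 32 from rfl] at hn
      rw [show ('a'.val).toNat = 97 from rfl] at h1
      rw [show ('z'.val).toNat = 122 from rfl] at h2
      omega
  · exact h

theorem camelU_true_eq (c : Char) (r : List Char) :
    camelU true (c :: r) = camelU false (c.toUpper :: r) := by
  by_cases hc : c = ' '
  · subst hc
    simp [camelU, show (' ').toUpper = ' ' from rfl]
  · have hu : c.toUpper ≠ ' ' := fun h => hc (toUpper_eq_space h)
    simp [camelU, hc, hu]

theorem camelU_append_nospace (p t : List Char) (hp : ∀ x ∈ p, x ≠ ' ') :
    camelU false (p ++ t) = p ++ camelU false t := by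
  induction p with
  | nil => rfl
  | cons x p ih =>
      have hx : x ≠ ' ' := hp x (by simp)
      simp [camelU, hx, ih (fun y hy => hp y (by simp [hy]))]

theorem camelU_nospace (t : List Char) (hp : ∀ x ∈ t, x ≠ ' ') :
    camelU false t = t := by
  have h := camelU_append_nospace t [] hp
  simpa [camelU] using h

theorem foldB_eq (cs : List Char) : ∀ (out : List Char) (up : Bool),
    (cs.foldl pvStepB (out, up)).1 = out ++ camelU up cs := by
  induction cs with
  | nil => simp [camelU]
  | cons c r ih =>
      intro out up
      by_cases hc : c = ' '
      · simp [pvStepB, hc, camelU, ih]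
      · cases up <;> simp [pvStepB, hc, camelU, ih]

theorem drop_cons_at (cs : List Char) (i : Nat) (h : i < cs.length) :
    cs.drop i = cs[i] :: cs.drop (i + 1) := by
  rw [List.drop_eq_getElem_cons h]

theorem loopA_eq : ∀ (n : Nat) (cs : List Char), cs.length ≤ n →
    cs.getLast? ≠ some ' ' → pvLoopA cs = camelU false cs := by
  intro n
  induction n with
  | zero =>
      intro cs hlen _
      have : cs = [] := List.eq_nil_of_length_eq_zero (Nat.le_zero.mp hlen)
      subst this
      rw [pvLoopA]
      decide
  | succ n ih =>
      intro cs hlen hlast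
      rw [pvLoopA]
      by_cases hf : PySem.Chars.find cs [' '] = -1
      · rw [if_pos hf]
        symm
        apply camelU_nospace
        intro x hx hxsp
        rw [PySem.Chars.find_eq_neg_one_iff] at hf
        apply hf
        obtain ⟨s, t, rfl⟩ := List.append_of_mem hx
        exact ⟨s, t, by simp [hxsp]⟩
      · rw [if_neg hf]
        have h0 : 0 ≤ PySem.Chars.find cs [' '] := by
          have := PySem.Chars.neg_one_le_find cs [' ']
          omega
        obtain ⟨hpre, hmin⟩ := PySem.Chars.find_spec (s := cs) (sub := [' ']) h0
        set j := (PySem.Chars.find cs [' ']).toNat with hj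
        have hjlen : j < cs.length := by
          by_contra hge
          rw [List.drop_eq_nil_of_le (by omega)] at hpre
          simp at hpre
        have hdj : cs.drop j = ' ' :: cs.drop (j + 1) := by
          obtain ⟨t0, ht0⟩ := hpre
          rw [drop_cons_at cs j hjlen] at ht0 ⊢
          simp only [List.cons_append, List.nil_append, List.cons.injEq] at ht0
          rw [← ht0.1]
        have hcs : cs = cs.take j ++ ' ' :: cs.drop (j + 1) := by
          conv_lhs => rw [← List.take_append_drop j cs]
          rw [hdj]
        have htake : ∀ x ∈ cs.take j, x ≠ ' ' := by
          intro x hx hxsp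
          obtain ⟨i, hi, hix⟩ := List.mem_take_iff_getElem.mp hx
          apply hmin i (by omega)
          exact ⟨cs.drop (i + 1), by rw [drop_cons_at cs i (by omega), hix, hxsp]; rfl⟩
        rcases hr : cs.drop (j + 1) with _ | ⟨c, r'⟩
        · exfalso
          apply hlast
          rw [hcs, hr]
          simp
        · have hr2 : r' = cs.drop (j + 2) := by
            have : (cs.drop (j + 1)).tail = cs.drop (j + 2) := by
              rw [List.tail_drop]
            rw [hr] at this
            simpa using this
          have hjl2 : j + 1 < cs.length := by
            by_contra hge
            rw [List.drop_eq_nil_of_le (by omega)] at hr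
            cases hr
          have hcj : cs[j + 1]'hjl2 = c := by
            have h2 := drop_cons_at cs (j + 1) hjl2
            rw [hr] at h2
            simp only [List.cons.injEq] at h2
            exact h2.1.symm
          have hget : PySem.List.pyGet? cs ((j : Int) + 1) = some c := by
            rw [show ((j : Int) + 1) = ((j + 1 : Nat) : Int) by push_cast; ring,
                PySem.List.pyGet?_natCast, List.getElem?_eq_getElem hjl2, hcj]
          have hsplice : pvSpliceA cs j = some (cs.take j ++ c.toUpper :: r') := by
            unfold pvSpliceA
            rw [hget, PySem.List.slice_to_natCast,
                show ((j : Int) + 2) = ((j + 2 : Nat) : Int) by push_cast; ring,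
                PySem.List.slice_from_natCast, ← hr2]
            simp
          split
          · next heq => rw [hsplice] at heq; cases heq
          · next t heq =>
              rw [hsplice] at heq
              injection heq with heq
              subst heq
              -- lengths for the IH
              have hlen2 : (cs.take j ++ c.toUpper :: r').length ≤ n := by
                have h1 : cs.length = j + 2 + r'.length := by
                  conv_lhs => rw [hcs, hr]
                  simp [List.length_take]
                  omega
                simp [List.length_take]
                omega
              -- the new list still has no trailing space
              have hlast2 : (cs.take j ++ c.toUpper :: r').getLast? ≠ some ' ' := by
                rcases hr' : r' with _ | ⟨y, r''⟩
                · have hc : c ≠ ' ' := by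
                    intro hcsp
                    apply hlast
                    rw [hcs, hr, hr', hcsp]
                    simp
                  have hu : c.toUpper ≠ ' ' := fun h => hc (toUpper_eq_space h)
                  simp [List.getLast?_append]
                  exact hu
                · intro hbad
                  apply hlast
                  rw [hcs, hr, hr']
                  rw [List.getLast?_append] at hbad ⊢
                  simpa using hbad
              rw [ih _ hlen2 hlast2]
              conv_rhs => rw [hcs]
              rw [camelU_append_nospace _ _ htake, camelU_append_nospace _ _ htake]
              congr 1
              rw [hr]
              rw [show camelU false (' ' :: c :: r') = camelU true (c :: r') by simp [camelU]]
              exact (camelU_true_eq c r').symm 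

theorem perString (s : List Char) (h : s.getLast? ≠ some ' ') :
    pvLoopA s = (s.foldl pvStepB ([], false)).1 := by
  rw [foldB_eq]
  simpa using loopA_eq s.length s le_rfl h

-- ===== VERDICT (by name: the statement is the Claim_ definition above) =====
theorem replaceColumn_spec : Claim_equal_replaceColumn := by
  intro column _ hpre
  unfold Spec_replaceColumn replaceColumn replaceColumn_alt
  apply List.map_congr_left
  intro s hs
  rw [perString s.toList (hpre s hs)]

@[simp] theorem replaceColumn_raises : Claim_raises_replaceColumn := by
  unfold Claim_raises_replaceColumn
  constructor
  · rintro column _ ⟨s, hs, hlast⟩ hpre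
    exact hpre s hs hlast
  · refine ⟨by decide, ⟨"a ", by decide⟩, by decide⟩
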